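-- pv_equiv track=rewrite | github.com/OrionStar25/CS5242-Final-Project | GRU/mlp.py | create_text_vocab
-- ===== SOURCE A (Python) =====
-- def create_text_vocab(data):
--     # Vocabulary starts with 1, 0 is for padding
--     text_vocab = {}
--     for sentence in data:
--         for word in sentence.split():
--             if word not in text_vocab:
--                 text_vocab[word] = len(text_vocab)+1
--
--     text_vocab['unk'] = len(text_vocab)+1
--     return text_vocab
-- ===== SOURCE B (Python) =====
-- def create_text_vocab(data):
--     # Scan the token stream in REVERSE, unconditionally overwriting, so each word
--     # ends up mapped to its first-occurrence index; then recover first-appearance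
--     # order by sorting on that index. No membership test anywhere.
--     tokens = [w for s in data for w in s.split()]
--     n = len(tokens)
--     first = {w: n - 1 - i for i, w in enumerate(reversed(tokens))}
--     order = sorted(first, key=first.get)
--     vocab = {w: i + 1 for i, w in enumerate(order)}
--     vocab['unk'] = len(vocab) + 1
--     return vocab
-- ===== Notes on version B (the rewrite author's own statement) =====
-- stated objective: alternative
-- what changed: Instead of A's single pass that membership-tests each token and conditionally inserts it into an ordered dict, B scans the token stream in reverse with unconditional overwrites so each word maps to its first-occurrence index, then reconstructs first-appearance order by sorting on that index and assigns 1-based ranks; the final unk store is the same dict assignment, preserving the overwrite behaviour when 'unk' occurs in the data.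
import Mathlib
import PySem

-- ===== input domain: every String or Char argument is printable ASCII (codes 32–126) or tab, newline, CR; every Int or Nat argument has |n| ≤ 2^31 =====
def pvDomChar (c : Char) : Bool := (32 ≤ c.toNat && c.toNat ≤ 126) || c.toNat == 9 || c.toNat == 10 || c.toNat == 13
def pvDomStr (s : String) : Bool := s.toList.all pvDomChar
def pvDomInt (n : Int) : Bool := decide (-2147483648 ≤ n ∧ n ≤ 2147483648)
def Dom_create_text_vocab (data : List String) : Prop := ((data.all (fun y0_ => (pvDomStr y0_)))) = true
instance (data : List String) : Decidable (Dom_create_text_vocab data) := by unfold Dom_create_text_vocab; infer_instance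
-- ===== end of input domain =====

-- B maps each word to its first-occurrence index by a reversed overwrite scan and sorts on it,
-- instead of A's interleaved membership-guarded ordered-dict insertion; objective: alternative.

-- ===== PORT A =====
def create_text_vocab (data : List String) : List (String × Int) :=
  let text_vocab : PySem.Dict String Int :=
    data.foldl (fun text_vocab sentence =>
      (PySem.Str.split₀ sentence).foldl (fun text_vocab word =>
        if text_vocab.contains word then text_vocab
        else text_vocab.insert word ((text_vocab.size : Int) + 1)) text_vocab)
      PySem.Dict.empty
  (text_vocab.insert "unk" ((text_vocab.size : Int) + 1)).items

-- ===== PORT B =====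
-- key 'first.get w' is exact: sorted only receives keys of first, on which get is
-- a value; .getD 0 is never taken on a missing key.
def create_text_vocab_alt (data : List String) : List (String × Int) :=
  let tokens := data.flatMap (fun s => PySem.Str.split₀ s)
  let n : Int := tokens.length
  let first : PySem.Dict String Int :=
    (PySem.List.enumerate tokens.reverse 0).foldl
      (fun d p => d.insert p.2 (n - 1 - p.1)) PySem.Dict.empty
  let order := PySem.List.sorted first.keys (fun w => first.getD w 0) false
  let vocab : PySem.Dict String Int :=
    PySem.Dict.ofList ((PySem.List.enumerate order 0).map (fun p => (p.2, p.1 + 1)))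
  (vocab.insert "unk" ((vocab.size : Int) + 1)).items

-- ===== PRECONDITION & SPEC =====
def Spec_create_text_vocab (data : List String) (out : List (String × Int)) : Prop := out = create_text_vocab_alt data
instance (data : List String) (out : List (String × Int)) : Decidable (Spec_create_text_vocab data out) := by unfold Spec_create_text_vocab; infer_instance

-- ===== CLAIM (what is proved, stated in full; the proofs are below) =====
def Claim_equal_create_text_vocab : Prop := ∀ (data : List String), Dom_create_text_vocab data → Spec_create_text_vocab data (create_text_vocab data)

-- ===== LEMMAS AND PROOFS =====

/-- The dictionary assigning indices 1,2,… to the words of `u`, in order. -/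
def toDict (u : List String) : PySem.Dict String Int :=
  PySem.Dict.mk ((PySem.List.enumerate u 0).map (fun p => (p.2, p.1 + 1)))

theorem any_snd_enumerate {α : Type} (u : List α) (f : α → Bool) (s : Int) :
    (PySem.List.enumerate u s).any (fun p => f p.2) = u.any f := by
  induction u generalizing s with
  | nil => simp [PySem.List.enumerate_nil]
  | cons x xs ih => simp [PySem.List.enumerate_cons, ih]

theorem toDict_contains (u : List String) (w : String) :
    (toDict u).contains w = u.contains w := by
  simp only [toDict, PySem.Dict.contains_mk, List.any_map]
  have : ((fun p : String × Int => p.1 == w) ∘ fun p : Int × String => (p.2, p.1 + 1))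
      = fun p : Int × String => (fun x : String => x == w) p.2 := rfl
  rw [this, any_snd_enumerate u (fun x => x == w) 0]
  simp [List.any_beq']

theorem toDict_size (u : List String) : (toDict u).size = u.length := by
  simp [toDict, PySem.Dict.size, PySem.List.length_enumerate]

theorem toDict_insert_fresh (u : List String) (w : String) (h : w ∉ u) :
    (toDict u).insert w ((u.length : Int) + 1) = toDict (u ++ [w]) := by
  apply PySem.Dict.ext
  rw [PySem.Dict.items_insert_of_not_contains]
  · simp [toDict, PySem.List.enumerate_append, PySem.List.enumerate_cons,
      PySem.List.enumerate_nil]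
  · simp [toDict_contains, h]

theorem loop_eq (ws : List String) (u : List String) :
    ws.foldl (fun tv w => if tv.contains w then tv
        else tv.insert w ((tv.size : Int) + 1)) (toDict u)
      = toDict (PySem.Set.update u ws) := by
  induction ws generalizing u with
  | nil => simp [PySem.Set.update]
  | cons w ws ih =>
    rw [PySem.Set.update_cons, List.foldl_cons]
    by_cases hw : w ∈ u
    · rw [PySem.Set.add_of_mem hw]
      simpa [toDict_contains, hw] using ih u
    · rw [PySem.Set.add_of_not_mem hw]
      have : (toDict u).contains w = false := by simp [toDict_contains, hw]
      simp only [this, Bool.false_eq_true, if_false, toDict_size,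
        toDict_insert_fresh u w hw]
      exact ih (u ++ [w])

theorem ofList_nodup_keys (ps : List (String × Int)) (h : (ps.map Prod.fst).Nodup) :
    PySem.Dict.ofList ps = PySem.Dict.mk ps := by
  apply PySem.Dict.ext
  rw [PySem.Dict.ofList, PySem.Dict.update,
    PySem.Dict.items_foldl_insert_fresh ps Prod.fst Prod.snd PySem.Dict.empty
      (fun a _ => by simp [PySem.Dict.contains_empty]) h]
  simp [PySem.Dict.empty]

theorem keys_nodup_pairs (u : List String) (hu : u.Nodup) :
    ((((PySem.List.enumerate u 0)).map (fun p => (p.2, p.1 + (1:Int)))).map Prod.fst).Nodup := by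
  rw [List.map_map]
  have : (Prod.fst ∘ fun p : Int × String => (p.2, p.1 + (1:Int)))
      = fun p : Int × String => p.2 := rfl
  rw [this, PySem.List.map_snd_enumerate u 0]
  exact hu

theorem idx_lt_length (xs : List String) (a : String) (ha : a ∈ xs) :
    ((PySem.List.index? xs a).getD 0) < xs.length := by
  obtain ⟨k, hk⟩ := Option.isSome_iff_exists.mp ((PySem.List.index?_isSome_iff xs a).mpr ha)
  obtain ⟨hlt, -⟩ := PySem.List.getElem_of_index?_eq_some hk
  rw [hk]; exact hlt

theorem pairwise_idx (xs : List String) :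
    (PySem.Set.ofList xs).Pairwise
      (fun a b => ((PySem.List.index? xs a).getD 0) < ((PySem.List.index? xs b).getD 0)) := by
  induction xs using List.reverseRecOn with
  | nil => simp [PySem.Set.ofList_nil]
  | append_singleton l x ih =>
    rw [PySem.Set.ofList_append_singleton]
    have hkey : ∀ a ∈ PySem.Set.ofList l,
        (PySem.List.index? (l ++ [x]) a).getD 0 = (PySem.List.index? l a).getD 0 := by
      intro a ha
      rw [PySem.List.index?_append_of_mem [x] ((PySem.Set.mem_ofList _ _).mp ha)]
    by_cases hx : x ∈ l
    · rw [PySem.Set.add_of_mem ((PySem.Set.mem_ofList _ _).mpr hx)]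
      refine ih.imp_of_mem ?_
      intro a b ha hb h
      rwa [hkey a ha, hkey b hb]
    · rw [PySem.Set.add_of_not_mem (fun h => hx ((PySem.Set.mem_ofList _ _).mp h))]
      rw [List.pairwise_append]
      refine ⟨ih.imp_of_mem (fun {a b} ha hb h => by rwa [hkey a ha, hkey b hb]),
        List.pairwise_singleton _ _, ?_⟩
      intro a ha b hb
      rw [List.mem_singleton] at hb; subst hb
      rw [hkey a ha, PySem.List.index?_append_singleton_self l b hx]
      simpa using idx_lt_length l a ((PySem.Set.mem_ofList _ _).mp ha)

/-- The reversed overwrite fold of B: its lookup is the first-occurrence index (shifted by `c`). -/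
theorem revfold_get? (xs : List String) (c : Int) (d : PySem.Dict String Int) (w : String) :
    ((PySem.List.enumerate xs.reverse 0).foldl (fun d p => d.insert p.2 (c - p.1)) d).get? w
      = if w ∈ xs then
          some (c - ((xs.length : Int) - 1) + ((PySem.List.index? xs w).getD 0 : Int))
        else d.get? w := by
  induction xs generalizing d with
  | nil => simp [PySem.List.enumerate_nil]
  | cons x t ih =>
    rw [List.reverse_cons, PySem.List.enumerate_append, List.foldl_append]
    simp only [List.length_reverse, PySem.List.enumerate_cons, PySem.List.enumerate_nil,
      List.foldl_cons, List.foldl_nil]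
    by_cases hw : w = x
    · subst hw
      rw [PySem.Dict.get?_insert_self, if_pos List.mem_cons_self,
        PySem.List.index?_cons_self]
      simp only [Option.getD_some, Nat.cast_zero, List.length_cons]
      congr 1; push_cast; ring
    · rw [PySem.Dict.get?_insert_of_ne _ _ hw, ih d]
      by_cases hm : w ∈ t
      · obtain ⟨k, hk⟩ := Option.isSome_iff_exists.mp
          ((PySem.List.index?_isSome_iff t w).mpr hm)
        rw [PySem.List.index?_cons_of_ne _ (fun h => hw h.symm), hk]
        simp [hm, hw]
        ring_nf
      · simp only [hm, if_false]
        rw [if_neg (fun h => (List.mem_cons.mp h).elim (fun h1 => hw h1) (fun h2 => hm h2))]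

theorem keys_nodup_foldl (l : List (Int × String)) (f : Int × String → Int)
    (d : PySem.Dict String Int) (h : d.keys.Nodup) :
    ((l.foldl (fun d p => d.insert p.2 (f p)) d).keys).Nodup := by
  induction l generalizing d with
  | nil => exact h
  | cons p l ih => exact ih _ (PySem.Dict.nodup_keys_insert _ _ _ h)

-- ===== VERDICT (by name: the statement is the Claim_ definition above) =====
theorem create_text_vocab_spec : Claim_equal_create_text_vocab := by
  intro data _
  show create_text_vocab data = create_text_vocab_alt data
  simp only [create_text_vocab, create_text_vocab_alt]
  set tokens := data.flatMap (fun s => PySem.Str.split₀ s) with htok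
  set first : PySem.Dict String Int :=
    (PySem.List.enumerate tokens.reverse 0).foldl
      (fun d p => d.insert p.2 ((tokens.length : Int) - 1 - p.1)) PySem.Dict.empty
    with hfirst
  have hget : ∀ w, first.get? w
      = if w ∈ tokens then some (((PySem.List.index? tokens w).getD 0 : Int)) else none := by
    intro w
    have := revfold_get? tokens ((tokens.length : Int) - 1) PySem.Dict.empty w
    rw [hfirst]
    have harg : (fun (d : PySem.Dict String Int) (p : Int × String) =>
        d.insert p.2 ((tokens.length : Int) - 1 - p.1))
      = fun d p => d.insert p.2 (((tokens.length : Int) - 1) - p.1) := rfl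
    rw [harg, this, PySem.Dict.get?_empty]
    split_ifs with hm
    · congr 1; ring
    · rfl
  have hmemkeys : ∀ w, w ∈ first.keys ↔ w ∈ tokens := by
    intro w
    rw [← PySem.Dict.contains_iff_mem_keys]
    constructor
    · intro hc
      by_contra hm
      have h0 := hget w
      rw [if_neg hm] at h0
      have := (PySem.Dict.get?_eq_none_iff_contains _ _).mp h0
      rw [hc] at this
      exact Bool.true_eq_false ▸ Bool.noConfusion this
    · intro hm
      have h0 := hget w
      rw [if_pos hm] at h0
      by_contra hc
      have hfalse : first.contains w = false := by
        simpa using hc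
      rw [(PySem.Dict.get?_eq_none_iff_contains _ _).mpr hfalse] at h0
      simp at h0
  have hnodup : first.keys.Nodup := by
    rw [hfirst]
    exact keys_nodup_foldl _ (fun p => (tokens.length : Int) - 1 - p.1) _
      PySem.Dict.nodup_keys_empty
  have hperm : (PySem.Set.ofList tokens).Perm first.keys := by
    rw [List.perm_ext_iff_of_nodup (PySem.Set.nodup_ofList _) hnodup]
    intro w
    rw [PySem.Set.mem_ofList, hmemkeys]
  have hkeyval : ∀ w ∈ tokens,
      first.getD w 0 = ((PySem.List.index? tokens w).getD 0 : Int) := by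
    intro w hw
    rw [PySem.Dict.getD_eq_get?_getD, hget w, if_pos hw, Option.getD_some]
  have hpw : (PySem.Set.ofList tokens).Pairwise
      (fun a b => first.getD a 0 < first.getD b 0) := by
    refine (pairwise_idx tokens).imp_of_mem ?_
    intro a b ha hb h
    rw [hkeyval a ((PySem.Set.mem_ofList _ _).mp ha),
      hkeyval b ((PySem.Set.mem_ofList _ _).mp hb)]
    exact_mod_cast h
  have hsorted : PySem.List.sorted first.keys (fun w => first.getD w 0) false
      = PySem.Set.ofList tokens :=
    PySem.List.sorted_eq_of_perm_of_pairwise_lt _ _ _ hperm hpw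
  have hA : (PySem.Dict.empty : PySem.Dict String Int) = toDict [] := by
    apply PySem.Dict.ext; simp [toDict, PySem.List.enumerate_nil, PySem.Dict.empty]
  rw [hA, ← List.foldl_flatMap, loop_eq, PySem.Set.update_nil_left, ← htok, hsorted,
    ofList_nodup_keys _ (keys_nodup_pairs _ (PySem.Set.nodup_ofList _)), ← toDict]
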